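-- pv_equiv track=rewrite | github.com/seanmctnenagh/Voice-Stats | fuzzy.py | word_groups
-- ===== SOURCE A (Python) =====
-- def word_groups(words, number): # Creates a list of pairs, triples etc. of words
--     groups = []
--     for j in range(len(words.split())-(number-1)):
--         group = ""
--         for i in range(number):
--             if words.split()[j + i] != " ":
--                 group += words.split()[j+i]
--                 if i < number-1 and group != '':
--                     group += " "
--                 else:
--                     break
--         if group not in ['', ' ', '  ']:
--             groups.append(group)
--     return groups
-- ===== SOURCE B (Python) =====
-- def word_groups(words, number):
--     tokens = words.split()
--     if number < 1 or len(tokens) < number: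
--         return []
--     return [" ".join(g) for g in zip(*(tokens[i:] for i in range(number)))]
-- ===== Notes on version B (the rewrite author's own statement) =====
-- stated objective: idiomatic
-- what changed: B splits the string once and builds the n-grams by zipping number shifted views of the token list and space-joining each tuple, instead of A's nested index loops that re-split the whole string at every single token access and re-filter tokens that split() can never produce.
import Mathlib
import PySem

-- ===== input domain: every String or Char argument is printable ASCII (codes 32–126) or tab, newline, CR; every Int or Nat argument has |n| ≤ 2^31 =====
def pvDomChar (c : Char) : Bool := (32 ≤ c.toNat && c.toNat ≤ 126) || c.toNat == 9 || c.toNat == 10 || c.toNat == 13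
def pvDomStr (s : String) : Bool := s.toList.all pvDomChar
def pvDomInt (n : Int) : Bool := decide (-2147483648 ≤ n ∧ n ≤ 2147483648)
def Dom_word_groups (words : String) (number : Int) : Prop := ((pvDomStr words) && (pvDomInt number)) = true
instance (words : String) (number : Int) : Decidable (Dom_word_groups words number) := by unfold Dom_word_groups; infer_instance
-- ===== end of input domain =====

-- B splits the string once and zips `number` shifted token-list views into space-joined n-grams,
-- replacing A's nested index loops that re-split the whole string at every token access (objective: idiomatic).


-- ===== PORT A =====
-- A's inner `for i in range(number)` with its early `break`; the growing group str is carried as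
-- List Char (the List Char model of str; exact). `words.split()[j+i]` is re-evaluated at each
-- access exactly as in A; the index is always in range where the access is reached, so pyGetD is exact.
def wgInnerA (words : String) (number : Int) (j : Int) : List Int → List Char → List Char
  | [], group => group
  | i :: rest, group =>
    if (PySem.List.pyGetD (PySem.Str.split₀ words) (j + i) " ") ≠ " " then
      let g' := group ++ (PySem.List.pyGetD (PySem.Str.split₀ words) (j + i)  " ").toList
      if i < number - 1 ∧ g' ≠ [] then wgInnerA words number j rest (g' ++ [' '])
      else g'                                   -- break
    else wgInnerA words number j rest group

def word_groups (words : String) (number : Int) : List String :=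
  (PySem.List.pyRange 0 (((PySem.Str.split₀ words).length : Int) - (number - 1)) 1).foldl
    (fun groups j =>
      let group := wgInnerA words number j (PySem.List.pyRange 0 number 1) []
      if group ∉ ([[], [' '], [' ', ' ']] : List (List Char)) then groups ++ [String.ofList group]
      else groups) []

-- ===== PORT B =====
-- zip(*iterables): stops at the shortest; zip() of no iterables yields nothing
def pvZipN {α : Type} : List (List α) → List (List α)
  | [] => []
  | [l] => l.map (fun x => [x])
  | l :: l' :: ls => ((l.zip (pvZipN (l' :: ls))).map (fun p => p.1 :: p.2))

def word_groups_alt (words : String) (number : Int) : List String :=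
  let tokens := PySem.Str.split₀ words
  if number < 1 ∨ (tokens.length : Int) < number then []
  else (pvZipN ((PySem.List.pyRange 0 number 1).map
          (fun i => PySem.List.slice tokens (some i) none))).map
        (fun g => PySem.Str.join " " g)

-- ===== PRECONDITION & SPEC =====
def Spec_word_groups (words : String) (number : Int) (out : List String) : Prop := out = word_groups_alt words number
instance (words : String) (number : Int) (out : List String) : Decidable (Spec_word_groups words number out) := by unfold Spec_word_groups; infer_instance

-- ===== CLAIM (what is proved, stated in full; the proofs are below) =====
def Claim_equal_word_groups : Prop := ∀ (words : String) (number : Int), Dom_word_groups words number → Spec_word_groups words number (word_groups words number)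

-- ===== LEMMAS AND PROOFS =====

-- space-joined concatenation of a list of tokens, on the List Char side
def joinChars (g : List String) : List Char := PySem.Chars.join [' '] (g.map String.toList)

-- every token that split() produces is nonempty and contains no whitespace character
theorem split₀_go_tokens (s : List Char) : ∀ (cur : List Char) (acc : List (List Char)),
    (∀ c ∈ cur, PySem.Chars.isspace c = false) →
    (∀ t ∈ acc, t ≠ [] ∧ ∀ c ∈ t, PySem.Chars.isspace c = false) →
    ∀ t ∈ PySem.Chars.split₀.go s cur acc, t ≠ [] ∧ ∀ c ∈ t, PySem.Chars.isspace c = false := by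
  induction s with
  | nil =>
    intro cur acc hcur hacc t ht
    simp only [PySem.Chars.split₀.go] at ht
    split at ht
    · exact hacc t (List.mem_reverse.mp ht)
    · rename_i hne
      rcases List.mem_cons.mp (List.mem_reverse.mp ht) with h | h
      · subst h
        refine ⟨by simpa [List.isEmpty_iff] using hne, ?_⟩
        intro c hc; exact hcur c (List.mem_reverse.mp hc)
      · exact hacc t h
  | cons c rest ih =>
    intro cur acc hcur hacc t ht
    simp only [PySem.Chars.split₀.go] at ht
    split at ht
    · split at ht
      · exact ih [] acc (by simp) hacc t ht
      · rename_i hne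
        refine ih [] (cur.reverse :: acc) (by simp) ?_ t ht
        intro u hu
        rcases List.mem_cons.mp hu with h | h
        · subst h
          refine ⟨by simpa [List.isEmpty_iff] using hne, ?_⟩
          intro d hd; exact hcur d (List.mem_reverse.mp hd)
        · exact hacc u h
    · rename_i hns
      refine ih (c :: cur) acc ?_ hacc t ht
      intro d hd
      rcases List.mem_cons.mp hd with h | h
      · subst h; simpa using hns
      · exact hcur d h

theorem split₀_tokens (words : String) :
    ∀ t ∈ PySem.Str.split₀ words, t.toList ≠ [] ∧ ∀ c ∈ t.toList, PySem.Chars.isspace c = false := by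
  intro t ht
  have h2 : t.toList ∈ PySem.Chars.split₀ words.toList := by
    rw [← PySem.Str.split₀_map_toList]
    exact List.mem_map_of_mem ht
  exact split₀_go_tokens words.toList [] [] (by intro c hc; cases hc) (by intro u hu; cases hu)
    t.toList (by simpa [PySem.Chars.split₀] using h2)

theorem token_ne_space {t : String} (h : ∀ c ∈ t.toList, PySem.Chars.isspace c = false) : t ≠ " " := by
  intro he; subst he
  have := h ' ' (by decide)
  simp [PySem.Chars.isspace] at this

theorem joinChars_cons {t : String} {l : List String} (h : l ≠ []) :
    joinChars (t :: l) = t.toList ++ ' ' :: joinChars l := by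
  cases l with
  | nil => exact absurd rfl h
  | cons q r => simp [joinChars, PySem.Chars.join_cons_cons]

-- the inner loop builds exactly the space-joined window of the last k tokens it still has to visit
theorem wgInnerA_spec (words : String) (number j : Int)
    (htok : ∀ t ∈ PySem.Str.split₀ words, t.toList ≠ [] ∧ ∀ c ∈ t.toList, PySem.Chars.isspace c = false) :
    ∀ (k : Nat) (i0 : Int) (g : List Char), 1 ≤ k → i0 = number - k → 0 ≤ i0 → 0 ≤ j →
      j + number ≤ ((PySem.Str.split₀ words).length : Int) →
      wgInnerA words number j (PySem.List.pyRange i0 number 1) g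
        = g ++ joinChars (((PySem.Str.split₀ words).drop (j + i0).toNat).take k) := by
  intro k
  induction k with
  | zero => omega
  | succ k ih =>
    intro i0 g _ hi0 hi00 hj hjn
    have hidx : (j + i0).toNat < (PySem.Str.split₀ words).length := by omega
    have htget : PySem.List.pyGetD (PySem.Str.split₀ words) (j + i0) " "
        = (PySem.Str.split₀ words)[(j + i0).toNat] := by
      rw [PySem.List.pyGetD_of_nonneg _ " " (by omega)]
      exact List.getD_eq_getElem _ " " hidx
    have hT := htok _ (List.getElem_mem hidx)
    have hne : PySem.List.pyGetD (PySem.Str.split₀ words) (j + i0) " " ≠ " " :=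
      htget ▸ token_ne_space hT.2
    have hdrop : (PySem.Str.split₀ words).drop (j + i0).toNat
        = (PySem.Str.split₀ words)[(j + i0).toNat] :: (PySem.Str.split₀ words).drop ((j + i0).toNat + 1) :=
      List.drop_eq_getElem_cons hidx
    rcases Nat.eq_zero_or_pos k with hk0 | hkpos
    · -- last iteration: i0 = number - 1, the loop breaks
      subst hk0
      have hrange : PySem.List.pyRange i0 number 1 = [i0] := by
        have h1 : number = i0 + 1 := by omega
        rw [h1]; exact PySem.List.pyRange_one_singleton i0
      rw [hrange]
      simp only [wgInnerA]
      split_ifs with h1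
      · exact absurd h1.1 (by omega)
      · rw [hdrop, htget]
        simp only [List.take_succ_cons, List.take_zero, joinChars, List.map_cons, List.map_nil,
          PySem.Chars.join_singleton]
    · -- middle iteration: append the token and a space, recurse
      have hlt : i0 < number - 1 := by omega
      have hrange : PySem.List.pyRange i0 number 1 = i0 :: PySem.List.pyRange (i0 + 1) number 1 :=
        PySem.List.pyRange_one_cons (by omega)
      rw [hrange]
      simp only [wgInnerA]
      have hg' : (g ++ (PySem.List.pyGetD (PySem.Str.split₀ words) (j + i0) " ").toList) ≠ [] := by
        simp only [ne_eq, List.append_eq_nil_iff, not_and]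
        intro _; exact htget ▸ hT.1
      split_ifs with h1
      · rw [ih (i0 + 1) _ (by omega) (by omega) (by omega) hj hjn]
        have harith : (j + (i0 + 1)).toNat = (j + i0).toNat + 1 := by omega
        rw [harith, hdrop]
        have htail : (((PySem.Str.split₀ words).drop ((j + i0).toNat + 1)).take k).length = k := by
          rw [List.length_take, List.length_drop]; omega
        have htailne : ((PySem.Str.split₀ words).drop ((j + i0).toNat + 1)).take k ≠ [] := by
          intro hnil; rw [hnil] at htail; simp at htail; omega
        rw [List.take_succ_cons, joinChars_cons htailne, htget]
        simp
      · exact absurd (And.intro hlt hg') h1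

-- zipping the n+1 shifted views of ts yields exactly the windows of length n+1
theorem pvZipN_cons {α : Type} (l : List α) (rest : List (List α)) (h : rest ≠ []) :
    pvZipN (l :: rest) = (l.zip (pvZipN rest)).map (fun p => p.1 :: p.2) := by
  cases rest with
  | nil => exact absurd rfl h
  | cons r rs => rfl

theorem pvZipN_windows {α : Type} (n : Nat) : ∀ (ts : List α),
    pvZipN ((List.range (n+1)).map (fun i => ts.drop i))
      = (List.range (ts.length - n)).map (fun j => (ts.drop j).take (n+1)) := by
  induction n with
  | zero =>
    intro ts
    rw [show (0+1) = 1 from rfl, List.range_one]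
    simp only [List.map_cons, List.map_nil, Nat.sub_zero, List.drop_zero, pvZipN]
    apply List.ext_getElem
    · simp
    · intro j h1 h2
      simp only [List.getElem_map, List.getElem_range] at *
      rw [List.drop_eq_getElem_cons (by simpa using h1), List.take_succ_cons, List.take_zero]
  | succ n ih =>
    intro ts
    have hsplit : (List.range (n+1+1)).map (fun i => ts.drop i)
        = ts :: (List.range (n+1)).map (fun i => (ts.drop 1).drop i) := by
      rw [List.range_succ_eq_map]
      simp only [List.map_cons, List.drop_zero, List.map_map]
      congr 1
      apply List.map_congr_left
      intro i _
      simp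
    rw [hsplit, pvZipN_cons _ _ (by simp), ih (ts.drop 1)]
    apply List.ext_getElem
    · simp only [List.length_map, List.length_zip, List.length_range, List.length_drop]
      omega
    · intro j h1 h2
      simp only [List.getElem_map, List.getElem_zip, List.getElem_range] at *
      have hj : j < ts.length - (n+1) := by
        simp only [List.length_map, List.length_zip, List.length_range, List.length_drop] at h1
        omega
      rw [List.drop_drop, Nat.add_comm 1 j]
      rw [List.drop_eq_getElem_cons (l := ts) (i := j) (by omega), List.take_succ_cons]

theorem ofList_joinChars (g : List String) : String.ofList (joinChars g) = PySem.Str.join " " g := by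
  have h := PySem.Str.toList_join " " g
  have : joinChars g = (PySem.Str.join " " g).toList := by rw [h]; rfl
  rw [this, String.ofList_toList]

-- a nonempty space-joined group of split() tokens is never '', ' ' or '  '
theorem group_not_filtered {g : List String} (hg : g ≠ [])
    (h0 : ∀ t ∈ g, t.toList ≠ [] ∧ ∀ c ∈ t.toList, PySem.Chars.isspace c = false) :
    joinChars g ∉ ([[], [' '], [' ', ' ']] : List (List Char)) := by
  cases g with
  | nil => exact absurd rfl hg
  | cons t rest =>
    have hT := h0 t (List.mem_cons_self)
    have hstart : ∃ c cs tail, joinChars (t :: rest) = c :: cs ++ tail ∧ PySem.Chars.isspace c = false := by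
      obtain ⟨c, cs, hc⟩ := List.exists_cons_of_ne_nil hT.1
      cases rest with
      | nil =>
        exact ⟨c, cs, [], by simp [joinChars, PySem.Chars.join_singleton, hc],
          hT.2 c (by rw [hc]; exact List.mem_cons_self)⟩
      | cons q r =>
        refine ⟨c, cs, ' ' :: joinChars (q :: r), ?_, hT.2 c (by rw [hc]; exact List.mem_cons_self)⟩
        rw [joinChars_cons (by simp), hc]
    obtain ⟨c, cs, tail, heq, hcs⟩ := hstart
    rw [heq]
    have hcsp : c ≠ ' ' := by
      intro hc; subst hc
      simp [PySem.Chars.isspace] at hcs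
    simp only [List.mem_cons, List.not_mem_nil, or_false]
    push Not
    refine ⟨by simp, ?_, ?_⟩
    · intro hcontra
      have : c = ' ' := by
        have := congrArg (fun l => l.head?) hcontra
        simpa using this
      exact hcsp this
    · intro hcontra
      have : c = ' ' := by
        have := congrArg (fun l => l.head?) hcontra
        simpa using this
      exact hcsp this

-- ===== VERDICT (by name: the statement is the Claim_ definition above) =====
theorem word_groups_spec : Claim_equal_word_groups := by
  intro words number _
  unfold Spec_word_groups word_groups word_groups_alt
  by_cases hneg : number < 1
  · -- number < 1: A's inner range is empty, every group is '' and gets filtered; B returns []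
    rw [if_pos (Or.inl hneg)]
    rw [PySem.List.foldl_congr_mem _ _ (fun (a : List String) (_ : Int) => a) []
      (by
        intro acc j _
        rw [PySem.List.pyRange_one_eq_nil (by omega : number ≤ (0:Int))]
        simp [wgInnerA])]
    exact List.foldl_fixed _
  · by_cases hbig : ((PySem.Str.split₀ words).length : Int) < number
    · -- not enough tokens: A's outer range is empty; B returns []
      rw [if_pos (Or.inr hbig)]
      rw [PySem.List.pyRange_one_eq_nil
        (a := 0) (b := ((PySem.Str.split₀ words).length : Int) - (number - 1)) (by omega)]
      rfl
    · -- main case: 1 ≤ number ≤ token count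
      rw [if_neg (by push Not; exact ⟨le_of_not_gt hneg, le_of_not_gt hbig⟩)]
      have htok := split₀_tokens words
      obtain ⟨n, hn⟩ : ∃ n : Nat, number = (n : Int) + 1 := ⟨(number - 1).toNat, by omega⟩
      have hnL : n + 1 ≤ (PySem.Str.split₀ words).length := by
        have := le_of_not_gt hbig; omega
      -- A's side: each iteration appends the space-joined window starting at j
      have hA : (PySem.List.pyRange 0 (((PySem.Str.split₀ words).length : Int) - (number - 1)) 1).foldl
          (fun groups j =>
            let group := wgInnerA words number j (PySem.List.pyRange 0 number 1) []
            if group ∉ ([[], [' '], [' ', ' ']] : List (List Char)) then groups ++ [String.ofList group]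
            else groups) []
          = (PySem.List.pyRange 0 (((PySem.Str.split₀ words).length : Int) - (number - 1)) 1).map
              (fun j => String.ofList (joinChars (((PySem.Str.split₀ words).drop j.toNat).take (n+1)))) := by
        rw [PySem.List.foldl_congr_mem _ _
          (fun acc j => acc ++ [String.ofList (joinChars (((PySem.Str.split₀ words).drop j.toNat).take (n+1)))]) []
          ?_]
        · exact PySem.List.foldl_append_singleton_eq_map _ _ []
        · intro acc j hj
          rw [PySem.List.mem_pyRange_one] at hj
          have hwin := wgInnerA_spec words number j htok (n+1) 0 [] (by omega)
            (by omega) (by omega) (by omega) (by omega)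
          rw [add_zero] at hwin
          simp only [hwin, List.nil_append]
          have hwlen : (((PySem.Str.split₀ words).drop j.toNat).take (n+1)).length = n + 1 := by
            rw [List.length_take, List.length_drop]; omega
          rw [if_pos (group_not_filtered (by intro hnil; rw [hnil] at hwlen; simp at hwlen)
            (by intro t ht; exact htok t (List.mem_of_mem_drop (List.mem_of_mem_take ht))))]
      rw [hA]
      -- B's side: the zipped shifted views are exactly the windows
      have hviews : (PySem.List.pyRange 0 number 1).map
            (fun i => PySem.List.slice (PySem.Str.split₀ words) (some i) none)
          = (List.range (n+1)).map (fun i => (PySem.Str.split₀ words).drop i) := by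
        rw [PySem.List.pyRange_one, List.map_map,
          show ((number : Int) - 0).toNat = n + 1 by omega]
        apply List.map_congr_left
        intro k hk
        simp only [Function.comp]
        rw [PySem.List.slice_from _ (by omega)]
        congr 1
        omega
      rw [hviews, pvZipN_windows]
      -- both are maps over the same index range; compare elementwise
      rw [PySem.List.pyRange_one, List.map_map, List.map_map]
      apply List.ext_getElem
      · simp only [List.length_map, List.length_range]
        omega
      · intro k h1 h2
        simp only [List.getElem_map, List.getElem_range, Function.comp]
        rw [show ((0:Int) + (k:Int)).toNat = k by omega]
        exact ofList_joinChars _
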